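-- pv_equiv track=rewrite | github.com/AWS-Ai-Sketch-to-Cloud/aws-ai | backend/app/routers/github.py | _extract_language_hints
-- ===== SOURCE A (Python) =====
-- def _extract_language_hints(files: list[str]) -> list[str]:
--     lowered = {f.lower().split("/")[-1] for f in files}
--     hints: list[str] = []
--     if "package.json" in lowered:
--         hints.append("Node.js/TypeScript")
--     if "requirements.txt" in lowered or "pyproject.toml" in lowered:
--         hints.append("Python")
--     if "pom.xml" in lowered or "build.gradle" in lowered:
--         hints.append("Java")
--     if "go.mod" in lowered:
--         hints.append("Go")
--     if "cargo.toml" in lowered: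
--         hints.append("Rust")
--     return hints
-- ===== SOURCE B (Python) =====
-- _MARKER_HINT = {
--     "package.json": "Node.js/TypeScript",
--     "requirements.txt": "Python",
--     "pyproject.toml": "Python",
--     "pom.xml": "Java",
--     "build.gradle": "Java",
--     "go.mod": "Go",
--     "cargo.toml": "Rust",
-- }
--
-- _ORDER = ["Node.js/TypeScript", "Python", "Java", "Go", "Rust"]
--
--
-- def _extract_language_hints(files: list[str]) -> list[str]:
--     found: set[str] = set()
--     for f in files:
--         hint = _MARKER_HINT.get(f.lower().split("/")[-1])
--         if hint is not None:
--             found.add(hint)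
--     return [h for h in _ORDER if h in found]
-- ===== Notes on version B (the rewrite author's own statement) =====
-- stated objective: idiomatic
-- what changed: Instead of building a set of basenames and testing each marker's membership in it, B makes one pass over the files, mapping each basename through a marker-to-hint dictionary into a set of found hints, then emits the found hints in a fixed canonical order; the per-marker membership scans disappear.
import Mathlib
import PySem

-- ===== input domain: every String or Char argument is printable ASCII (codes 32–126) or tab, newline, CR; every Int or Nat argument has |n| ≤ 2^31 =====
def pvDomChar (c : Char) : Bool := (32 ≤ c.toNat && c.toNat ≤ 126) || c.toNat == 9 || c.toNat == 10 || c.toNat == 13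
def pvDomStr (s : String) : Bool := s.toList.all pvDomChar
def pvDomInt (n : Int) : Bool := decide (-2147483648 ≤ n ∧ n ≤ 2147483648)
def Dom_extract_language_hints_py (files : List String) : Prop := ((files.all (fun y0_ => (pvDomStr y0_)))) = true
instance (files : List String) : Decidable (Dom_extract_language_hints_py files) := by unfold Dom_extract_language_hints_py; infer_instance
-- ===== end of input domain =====

-- B replaces A's basename-set plus per-marker membership tests by ONE pass over the
-- files mapping each basename through a marker->hint dictionary into a set of found
-- hints, emitted in a fixed canonical order (idiomatic; return value only).

-- ===== PORT A =====
-- f.lower().split("/")[-1]: sep "/" is nonempty so split? returns some, and the resulting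
-- list is never empty, so [-1] is exactly the last element (exact on every input).
def pvBasenameA (f : String) : String :=
  ((PySem.Str.split? (PySem.Str.lower f) "/").getD []).getLastD ""

def extract_language_hints_py (files : List String) : List String :=
  let lowered : PySem.Set String := PySem.Set.ofList (files.map pvBasenameA)
  let hints : List String := []
  let hints := if PySem.Set.contains lowered "package.json" then hints ++ ["Node.js/TypeScript"] else hints
  let hints := if PySem.Set.contains lowered "requirements.txt" || PySem.Set.contains lowered "pyproject.toml" then hints ++ ["Python"] else hints
  let hints := if PySem.Set.contains lowered "pom.xml" || PySem.Set.contains lowered "build.gradle" then hints ++ ["Java"] else hints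
  let hints := if PySem.Set.contains lowered "go.mod" then hints ++ ["Go"] else hints
  let hints := if PySem.Set.contains lowered "cargo.toml" then hints ++ ["Rust"] else hints
  hints

-- ===== PORT B =====
def pvMarkerHint : PySem.Dict String String :=
  PySem.Dict.ofList
    [("package.json", "Node.js/TypeScript"),
     ("requirements.txt", "Python"),
     ("pyproject.toml", "Python"),
     ("pom.xml", "Java"),
     ("build.gradle", "Java"),
     ("go.mod", "Go"),
     ("cargo.toml", "Rust")]

def pvOrder : List String := ["Node.js/TypeScript", "Python", "Java", "Go", "Rust"]

-- same Python expression f.lower().split("/")[-1] in Source B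
def pvBasenameB (f : String) : String :=
  ((PySem.Str.split? (PySem.Str.lower f) "/").getD []).getLastD ""

def extract_language_hints_py_alt (files : List String) : List String :=
  let found : PySem.Set String :=
    files.foldl
      (fun s f =>
        match PySem.Dict.get? pvMarkerHint (pvBasenameB f) with
        | some h => PySem.Set.add s h
        | none => s)
      PySem.Set.empty
  pvOrder.filter (fun h => PySem.Set.contains found h)

-- ===== PRECONDITION & SPEC =====
def Spec_extract_language_hints_py (files : List String) (out : List String) : Prop := out = extract_language_hints_py_alt files
instance (files : List String) (out : List String) : Decidable (Spec_extract_language_hints_py files out) := by unfold Spec_extract_language_hints_py; infer_instance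

-- ===== CLAIM (what is proved, stated in full; the proofs are below) =====
def Claim_equal_extract_language_hints_py : Prop := ∀ (files : List String), Dom_extract_language_hints_py files → Spec_extract_language_hints_py files (extract_language_hints_py files)

-- ===== LEMMAS AND PROOFS =====

-- membership in B's accumulated 'found' set
theorem pv_mem_found (files : List String) (s : PySem.Set String) (y : String) :
    (y ∈ files.foldl
      (fun s f =>
        match PySem.Dict.get? pvMarkerHint (pvBasenameB f) with
        | some h => PySem.Set.add s h
        | none => s)
      s) ↔ y ∈ s ∨ ∃ f ∈ files, PySem.Dict.get? pvMarkerHint (pvBasenameB f) = some y := by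
  induction files generalizing s with
  | nil => simp
  | cons f fs ih =>
    simp only [List.foldl_cons, ih, List.exists_mem_cons_iff]
    cases hg : PySem.Dict.get? pvMarkerHint (pvBasenameB f) with
    | none => simp
    | some h =>
      simp only [PySem.Set.mem_add, Option.some.injEq]
      constructor
      · rintro ((hy | rfl) | hex)
        · exact Or.inl hy
        · exact Or.inr (Or.inl rfl)
        · exact Or.inr (Or.inr hex)
      · rintro (hy | rfl | hex)
        · exact Or.inl (Or.inl hy)
        · exact Or.inl (Or.inr rfl)
        · exact Or.inr hex

-- the literal marker->hint dictionary, evaluated pointwise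
theorem pv_get_markerHint (b : String) :
    PySem.Dict.get? pvMarkerHint b =
      if "package.json" = b then some "Node.js/TypeScript"
      else if "requirements.txt" = b then some "Python"
      else if "pyproject.toml" = b then some "Python"
      else if "pom.xml" = b then some "Java"
      else if "build.gradle" = b then some "Java"
      else if "go.mod" = b then some "Go"
      else if "cargo.toml" = b then some "Rust"
      else none := by
  have h : pvMarkerHint = PySem.Dict.mk
    [("package.json", "Node.js/TypeScript"),
     ("requirements.txt", "Python"),
     ("pyproject.toml", "Python"),
     ("pom.xml", "Java"),
     ("build.gradle", "Java"),
     ("go.mod", "Go"),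
     ("cargo.toml", "Rust")] := by decide
  rw [h]
  simp only [PySem.Dict.get?_mk_cons, beq_iff_eq]
  rfl

-- each hint is found iff one of its marker basenames occurs
theorem pv_hint1 (files : List String) :
    (∃ f ∈ files, PySem.Dict.get? pvMarkerHint (pvBasenameB f) = some "Node.js/TypeScript") ↔
      (∃ f ∈ files, pvBasenameA f = "package.json") := by
  constructor
  · rintro ⟨f, hf, hg⟩
    rw [pv_get_markerHint] at hg
    split_ifs at hg with a1 a2 a3 a4 a5 a6 a7 <;>
      first
        | exact absurd (Option.some.inj hg) (by decide)
        | exact ⟨f, hf, a1.symm⟩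
  · rintro ⟨f, hf, hb⟩
    exact ⟨f, hf, by rw [show pvBasenameB f = pvBasenameA f from rfl, hb, pv_get_markerHint]; decide⟩

theorem pv_hint2 (files : List String) :
    (∃ f ∈ files, PySem.Dict.get? pvMarkerHint (pvBasenameB f) = some "Python") ↔
      ((∃ f ∈ files, pvBasenameA f = "requirements.txt") ∨ (∃ f ∈ files, pvBasenameA f = "pyproject.toml")) := by
  constructor
  · rintro ⟨f, hf, hg⟩
    rw [pv_get_markerHint] at hg
    split_ifs at hg with a1 a2 a3 a4 a5 a6 a7 <;>
      first
        | exact absurd (Option.some.inj hg) (by decide)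
        | exact Or.inl ⟨f, hf, a2.symm⟩
        | exact Or.inr ⟨f, hf, a3.symm⟩
  · rintro (⟨f, hf, hb⟩ | ⟨f, hf, hb⟩) <;>
      exact ⟨f, hf, by rw [show pvBasenameB f = pvBasenameA f from rfl, hb, pv_get_markerHint]; decide⟩

theorem pv_hint3 (files : List String) :
    (∃ f ∈ files, PySem.Dict.get? pvMarkerHint (pvBasenameB f) = some "Java") ↔
      ((∃ f ∈ files, pvBasenameA f = "pom.xml") ∨ (∃ f ∈ files, pvBasenameA f = "build.gradle")) := by
  constructor
  · rintro ⟨f, hf, hg⟩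
    rw [pv_get_markerHint] at hg
    split_ifs at hg with a1 a2 a3 a4 a5 a6 a7 <;>
      first
        | exact absurd (Option.some.inj hg) (by decide)
        | exact Or.inl ⟨f, hf, a4.symm⟩
        | exact Or.inr ⟨f, hf, a5.symm⟩
  · rintro (⟨f, hf, hb⟩ | ⟨f, hf, hb⟩) <;>
      exact ⟨f, hf, by rw [show pvBasenameB f = pvBasenameA f from rfl, hb, pv_get_markerHint]; decide⟩

theorem pv_hint4 (files : List String) :
    (∃ f ∈ files, PySem.Dict.get? pvMarkerHint (pvBasenameB f) = some "Go") ↔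
      (∃ f ∈ files, pvBasenameA f = "go.mod") := by
  constructor
  · rintro ⟨f, hf, hg⟩
    rw [pv_get_markerHint] at hg
    split_ifs at hg with a1 a2 a3 a4 a5 a6 a7 <;>
      first
        | exact absurd (Option.some.inj hg) (by decide)
        | exact ⟨f, hf, a6.symm⟩
  · rintro ⟨f, hf, hb⟩
    exact ⟨f, hf, by rw [show pvBasenameB f = pvBasenameA f from rfl, hb, pv_get_markerHint]; decide⟩

theorem pv_hint5 (files : List String) :
    (∃ f ∈ files, PySem.Dict.get? pvMarkerHint (pvBasenameB f) = some "Rust") ↔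
      (∃ f ∈ files, pvBasenameA f = "cargo.toml") := by
  constructor
  · rintro ⟨f, hf, hg⟩
    rw [pv_get_markerHint] at hg
    split_ifs at hg with a1 a2 a3 a4 a5 a6 a7 <;>
      first
        | exact absurd (Option.some.inj hg) (by decide)
        | exact ⟨f, hf, a7.symm⟩
  · rintro ⟨f, hf, hb⟩
    exact ⟨f, hf, by rw [show pvBasenameB f = pvBasenameA f from rfl, hb, pv_get_markerHint]; decide⟩

-- ===== VERDICT (by name: the statement is the Claim_ definition above) =====
theorem extract_language_hints_py_spec : Claim_equal_extract_language_hints_py := by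
  intro files _
  unfold Spec_extract_language_hints_py
  have kA : ∀ m, (PySem.Set.contains (PySem.Set.ofList (files.map pvBasenameA)) m = true) ↔
      ∃ f ∈ files, pvBasenameA f = m := by
    intro m
    rw [PySem.Set.contains_iff, PySem.Set.mem_ofList]
    simp [eq_comm]
  unfold extract_language_hints_py extract_language_hints_py_alt pvOrder
  simp only [List.filter, Bool.or_eq_true, kA]
  by_cases h1 : ∃ f ∈ files, pvBasenameA f = "package.json" <;>
  by_cases h2 : ∃ f ∈ files, pvBasenameA f = "requirements.txt" <;>
  by_cases h3 : ∃ f ∈ files, pvBasenameA f = "pyproject.toml" <;>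
  by_cases h4 : ∃ f ∈ files, pvBasenameA f = "pom.xml" <;>
  by_cases h5 : ∃ f ∈ files, pvBasenameA f = "build.gradle" <;>
  by_cases h6 : ∃ f ∈ files, pvBasenameA f = "go.mod" <;>
  by_cases h7 : ∃ f ∈ files, pvBasenameA f = "cargo.toml" <;>
  simp [h1, h2, h3, h4, h5, h6, h7, pv_mem_found, PySem.Set.empty, pv_hint1, pv_hint2, pv_hint3, pv_hint4, pv_hint5]
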